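-- pv_equiv track=rewrite | github.com/striver-21/NetBank-Easy | algo.py | maxOnesIndex
-- ===== SOURCE A (Python) =====
-- def maxOnesIndex(arr,n):
--
--
--
--     # for maximum number of 1 around a zero
--
--     max_count = 0
--
--
--
--     # for storing result
--
--     max_index =0
--
--
--
--     # index of previous zero
--
--     prev_zero = -1
--
--
--
--     # index of previous to previous zero
--
--     prev_prev_zero = -1
--
--
--
--     # Traverse the input array
--
--     for curr in range(n):
--
--
--
--         # If current element is 0,
--
--         # then calculate the difference
--
--         # between curr and prev_prev_zero
--
--         if (arr[curr] == 0):
--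
--
--
--             # Update result if count of
--
--             # 1s around prev_zero is more
--
--             if (curr - prev_prev_zero > max_count):
--
--
--
--                 max_count = curr - prev_prev_zero
--
--                 max_index = prev_zero
--
--
--
--
--
--             # Update for next iteration
--
--             prev_prev_zero = prev_zero
--
--             prev_zero = curr
--
--
--
--     # Check for the last encountered zero
--
--     if (n-prev_prev_zero > max_count):
--
--         max_index = prev_zero
--
--
--
--     return max_index
-- ===== SOURCE B (Python) =====
-- def maxOnesIndex(arr, n):
--     # Gap scan over the table of zero positions. The two leading -1 sentinels are the
--     # "previous zero" / "zero before that" start values ("no zero seen yet"); n closes the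
--     # last gap. Flipping the zero z with neighbours prev and nxt yields nxt - prev ones.
--     bounds = [-1, -1] + [i for i in range(n) if arr[i] == 0] + [n]
--     max_count, max_index = 0, 0
--     for prev, z, nxt in zip(bounds, bounds[1:], bounds[2:]):
--         count = nxt - prev
--         if count > max_count:
--             max_count, max_index = count, z
--     return max_index
-- ===== Notes on version B (the rewrite author's own statement) =====
-- stated objective: simpler
-- what changed: Replaces A's running prev-zero/prev-prev-zero tracker with conditional updates and a post-loop special case by a precomputed table of zero positions (with sentinels -1,-1 and n) and one uniform gap scan over consecutive triples.
import Mathlib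
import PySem

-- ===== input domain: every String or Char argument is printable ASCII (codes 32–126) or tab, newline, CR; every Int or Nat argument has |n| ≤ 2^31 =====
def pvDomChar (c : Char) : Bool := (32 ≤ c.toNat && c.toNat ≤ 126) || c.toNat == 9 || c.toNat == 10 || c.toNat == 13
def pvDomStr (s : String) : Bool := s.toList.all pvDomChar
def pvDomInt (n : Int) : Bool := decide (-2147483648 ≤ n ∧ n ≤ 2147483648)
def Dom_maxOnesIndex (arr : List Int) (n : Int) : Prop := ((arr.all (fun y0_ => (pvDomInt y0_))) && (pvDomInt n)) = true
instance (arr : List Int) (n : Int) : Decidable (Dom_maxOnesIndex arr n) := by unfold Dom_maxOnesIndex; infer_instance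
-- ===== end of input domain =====

-- B replaces A's running prev-zero/prev-prev-zero tracker by an explicit table of zero
-- positions with sentinels and a single gap scan over consecutive triples (objective: simpler).

-- ===== PORT A =====
-- state = (max_count, max_index, prev_zero, prev_prev_zero)
def maxOnesIndex (arr : List Int) (n : Int) : Int :=
  let st := (PySem.List.pyRange 0 n 1).foldl
    (fun (st : Int × Int × Int × Int) curr =>
      if PySem.List.pyGetD arr curr 1 == 0 then
        let st1 := if curr - st.2.2.2 > st.1 then (curr - st.2.2.2, st.2.2.1) else (st.1, st.2.1)
        (st1.1, st1.2, curr, st.2.2.1)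
      else st)
    ((0 : Int), (0 : Int), (-1 : Int), (-1 : Int))
  if n - st.2.2.2 > st.1 then st.2.2.1 else st.2.1

-- ===== PORT B =====
-- bounds = [-1, -1] + [i for i in range(n) if arr[i] == 0] + [n];
-- zip(bounds, bounds[1:], bounds[2:]) is bounds.zip (bounds[1:].zip bounds[2:])
def maxOnesIndex_alt (arr : List Int) (n : Int) : Int :=
  let bounds := [(-1 : Int), (-1 : Int)] ++ (PySem.List.pyRange 0 n 1).filter (fun i => PySem.List.pyGetD arr i 1 == 0) ++ [n]
  let st := (bounds.zip ((PySem.List.slice bounds (some 1) none).zip (PySem.List.slice bounds (some 2) none))).foldl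
    (fun (acc : Int × Int) t =>
      let count := t.2.2 - t.1
      if count > acc.1 then (count, t.2.1) else acc)
    ((0 : Int), (0 : Int))
  st.2

-- ===== PRECONDITION & SPEC =====
-- Pre_ excludes exactly n > len(arr), where both Pythons raise IndexError on arr[curr].
def Pre_maxOnesIndex (arr : List Int) (n : Int) : Prop := n ≤ arr.length
instance (arr : List Int) (n : Int) : Decidable (Pre_maxOnesIndex arr n) := by unfold Pre_maxOnesIndex; infer_instance
def pvWitness_maxOnesIndex : List Int × Int := ([1, 0, 1], 3)

def Spec_maxOnesIndex (arr : List Int) (n : Int) (out : Int) : Prop := out = maxOnesIndex_alt arr n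
instance (arr : List Int) (n : Int) (out : Int) : Decidable (Spec_maxOnesIndex arr n out) := by unfold Spec_maxOnesIndex; infer_instance

-- ===== CLAIM (what is proved, stated in full; the proofs are below) =====
def Claim_equal_maxOnesIndex : Prop := ∀ (arr : List Int) (n : Int), Dom_maxOnesIndex arr n → Pre_maxOnesIndex arr n → Spec_maxOnesIndex arr n (maxOnesIndex arr n)

-- ===== LEMMAS AND PROOFS =====

-- the zero positions (shared sub-expression of both ports)
def pvZeros (arr : List Int) (n : Int) : List Int :=
  (PySem.List.pyRange 0 n 1).filter (fun i => PySem.List.pyGetD arr i 1 == 0)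

-- the shared "strict max over candidates (count, index)" step
def pvStep (acc : Int × Int) (c : Int × Int) : Int × Int := if c.1 > acc.1 then c else acc

-- candidate list over a zero-position list Z with left sentinel p and right sentinel n
def pvCands : Int → List Int → Int → List (Int × Int)
  | _, [], _ => []
  | p, [z], n => [(n - p, z)]
  | p, z :: z' :: rest, n => (z' - p, z) :: pvCands z (z' :: rest) n

-- A's zero-branch step on the 4-tuple state (max_count, max_index, prev_zero, prev_prev_zero)
def pvStepZ (st : Int × Int × Int × Int) (curr : Int) : Int × Int × Int × Int :=
  let st1 := if curr - st.2.2.2 > st.1 then (curr - st.2.2.2, st.2.2.1) else (st.1, st.2.1)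
  (st1.1, st1.2, curr, st.2.2.1)

lemma pvA_fold (n : Int) : ∀ (Z : List Int) (mc mi pz ppz : Int),
    (let st := Z.foldl pvStepZ (mc, mi, pz, ppz)
     if n - st.2.2.2 > st.1 then st.2.2.1 else st.2.1)
    = (List.foldl pvStep (mc, mi) (pvCands ppz (pz :: Z) n)).2 := by
  intro Z
  induction Z with
  | nil =>
    intro mc mi pz ppz
    simp only [List.foldl_nil, pvCands, List.foldl_cons, pvStep]
    split_ifs with h
    · rfl
    · rfl
  | cons z rest ih =>
    intro mc mi pz ppz
    have h := ih (pvStep (mc, mi) (z - ppz, pz)).1 (pvStep (mc, mi) (z - ppz, pz)).2 z pz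
    rw [Prod.mk.eta] at h
    exact h

-- B's triple step
def pvStepB (acc : Int × Int) (t : Int × Int × Int) : Int × Int :=
  let count := t.2.2 - t.1
  if count > acc.1 then (count, t.2.1) else acc

def pvZip3 (l : List Int) : List (Int × Int × Int) := l.zip (l.tail.zip l.tail.tail)

lemma pvB_fold (n : Int) : ∀ (Z : List Int) (acc : Int × Int) (p : Int),
    List.foldl pvStepB acc (pvZip3 (p :: Z ++ [n])) = List.foldl pvStep acc (pvCands p Z n) := by
  intro Z
  induction Z with
  | nil => intro acc p; rfl
  | cons z rest ih =>
    intro acc p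
    cases rest with
    | nil => rfl
    | cons r rs =>
      have h1 : pvZip3 (p :: (z :: r :: rs) ++ [n])
          = (p, z, r) :: pvZip3 (z :: (r :: rs) ++ [n]) := rfl
      rw [h1, List.foldl_cons, ih (pvStepB acc (p, z, r)) z]
      rfl

lemma pvA_eq (arr : List Int) (n : Int) :
    maxOnesIndex arr n
    = (List.foldl pvStep ((0 : Int), (0 : Int)) (pvCands (-1) ((-1) :: pvZeros arr n) n)).2 := by
  have key : List.foldl
      (fun st curr => if PySem.List.pyGetD arr curr 1 == 0 then pvStepZ st curr else st)
      ((0 : Int), (0 : Int), (-1 : Int), (-1 : Int)) (PySem.List.pyRange 0 n 1)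
      = List.foldl pvStepZ ((0 : Int), (0 : Int), (-1 : Int), (-1 : Int)) (pvZeros arr n) :=
    PySem.List.foldl_if_eq_foldl_filter _ _ _ _
  have h0 : maxOnesIndex arr n
      = (fun st : Int × Int × Int × Int => if n - st.2.2.2 > st.1 then st.2.2.1 else st.2.1)
        (List.foldl
          (fun st curr => if PySem.List.pyGetD arr curr 1 == 0 then pvStepZ st curr else st)
          ((0 : Int), (0 : Int), (-1 : Int), (-1 : Int)) (PySem.List.pyRange 0 n 1)) := rfl
  rw [h0, key]
  exact pvA_fold n (pvZeros arr n) 0 0 (-1) (-1)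

lemma pvB_eq (arr : List Int) (n : Int) :
    maxOnesIndex_alt arr n
    = (List.foldl pvStep ((0 : Int), (0 : Int)) (pvCands (-1) ((-1) :: pvZeros arr n) n)).2 := by
  have h0 : maxOnesIndex_alt arr n
      = (List.foldl pvStepB ((0 : Int), (0 : Int))
          (((-1) :: (((-1) :: pvZeros arr n) ++ [n])).zip
            ((PySem.List.slice ((-1) :: (((-1) :: pvZeros arr n) ++ [n])) (some 1) none).zip
             (PySem.List.slice ((-1) :: (((-1) :: pvZeros arr n) ++ [n])) (some 2) none)))).2 := rfl
  have hs1 : PySem.List.slice ((-1) :: (((-1) :: pvZeros arr n) ++ [n])) (some 1) none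
      = ((-1) :: pvZeros arr n) ++ [n] := by
    rw [PySem.List.slice_from_one, List.tail_cons]
  have hs2 : PySem.List.slice ((-1) :: (((-1) :: pvZeros arr n) ++ [n])) (some 2) none
      = (((-1) :: pvZeros arr n) ++ [n]).tail := by
    rw [PySem.List.slice_from ((-1) :: (((-1) :: pvZeros arr n) ++ [n])) (by norm_num : (0 : Int) ≤ 2)]
    show List.drop 2 ((-1) :: (((-1) :: pvZeros arr n) ++ [n])) = (((-1) :: pvZeros arr n) ++ [n]).tail
    rw [List.drop_succ_cons, List.drop_one]
  rw [h0, hs1, hs2]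
  exact congrArg Prod.snd (pvB_fold n ((-1) :: pvZeros arr n) ((0 : Int), (0 : Int)) (-1))

-- ===== VERDICT (by name: the statement is the Claim_ definition above) =====
theorem maxOnesIndex_spec : Claim_equal_maxOnesIndex := by
  intro arr n _ _
  unfold Spec_maxOnesIndex
  rw [pvA_eq, pvB_eq]
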